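-- pv_equiv track=rewrite | github.com/origintree/hyqw_adapter | custom_components/hyqw_adapter/temperature_sensor_binder.py | get_devices_by_room
-- ===== SOURCE A (Python) =====
-- from typing import Dict, List, Optional, Set
--
-- def get_devices_by_room(devices: List[Dict]) -> Dict[str, List[Dict]]:
--     """按房间分组设备."""
--     room_devices = {}
--
--     for device in devices:
--         room_name = device.get("roomName", "未知房间")
--         if room_name not in room_devices:
--             room_devices[room_name] = []
--         room_devices[room_name].append(device)
--
--     return room_devices
-- ===== SOURCE B (Python) =====
-- def get_devices_by_room(devices):
--     """按房间分组设备."""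
--     def key(d):
--         return d.get("roomName", "未知房间")
--     rooms = dict.fromkeys(key(d) for d in devices)
--     return {r: [d for d in devices if key(d) == r] for r in rooms}
-- ===== Notes on version B (the rewrite author's own statement) =====
-- stated objective: alternative
-- what changed: Replaces the incremental bucket dict with a two-pass grouping: ordered-dedup of the room keys (dict.fromkeys) followed by one filter of the device list per room, built as a dict comprehension.
import Mathlib
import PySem

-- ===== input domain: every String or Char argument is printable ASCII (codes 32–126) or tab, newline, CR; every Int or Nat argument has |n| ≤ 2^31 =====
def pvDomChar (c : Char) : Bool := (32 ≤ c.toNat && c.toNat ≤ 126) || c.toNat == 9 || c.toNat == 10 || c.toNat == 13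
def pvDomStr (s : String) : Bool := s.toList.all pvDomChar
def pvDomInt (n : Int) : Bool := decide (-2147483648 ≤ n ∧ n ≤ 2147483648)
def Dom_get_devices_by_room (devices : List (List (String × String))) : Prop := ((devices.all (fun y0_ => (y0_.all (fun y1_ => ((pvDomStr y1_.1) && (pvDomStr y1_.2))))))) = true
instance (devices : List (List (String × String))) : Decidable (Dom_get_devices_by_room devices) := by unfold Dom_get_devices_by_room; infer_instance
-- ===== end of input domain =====

-- B groups by ordered-dedup of room keys plus one filter per room instead of A's incremental bucket dict; return value only (neither mutates its argument).

-- ===== PORT A =====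
-- device.get("roomName", "未知房间") on the device dict (assoc list, first match)
def roomKey (device : List (String × String)) : String :=
  (PySem.Dict.mk device).getD "roomName" "未知房间"

def get_devices_by_room (devices : List (List (String × String))) : List (String × List (List (String × String))) :=
  (devices.foldl
    (fun room_devices device =>
      let room_name := roomKey device
      let room_devices :=
        if room_devices.contains room_name then room_devices
        else room_devices.insert room_name []
      room_devices.modify room_name [] (· ++ [device]))
    PySem.Dict.empty).items

-- ===== PORT B =====
def get_devices_by_room_alt (devices : List (List (String × String))) : List (String × List (List (String × String))) :=
  let rooms := PySem.List.dedup (devices.map roomKey)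
  rooms.map (fun r => (r, devices.filter (fun d => roomKey d == r)))

-- ===== PRECONDITION & SPEC =====
def Spec_get_devices_by_room (devices : List (List (String × String))) (out : List (String × List (List (String × String)))) : Prop := out = get_devices_by_room_alt devices
instance (devices : List (List (String × String))) (out : List (String × List (List (String × String)))) : Decidable (Spec_get_devices_by_room devices out) := by unfold Spec_get_devices_by_room; infer_instance

-- ===== CLAIM (what is proved, stated in full; the proofs are below) =====
def Claim_equal_get_devices_by_room : Prop := ∀ (devices : List (List (String × String))), Dom_get_devices_by_room devices → Spec_get_devices_by_room devices (get_devices_by_room devices)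

-- ===== LEMMAS AND PROOFS =====

-- A's contains-check + insert-[] + append step is exactly one Dict.modify with default []
lemma stepA_eq_modify (d : PySem.Dict String (List (List (String × String)))) (k : String)
    (dev : List (String × String)) :
    (if d.contains k then d else d.insert k []).modify k [] (· ++ [dev])
      = d.modify k [] (· ++ [dev]) := by
  by_cases h : d.contains k = true
  · simp [h]
  · have hc : d.contains k = false := by simpa using h
    simp only [hc, Bool.false_eq_true, if_false, PySem.Dict.modify,
      PySem.Dict.getD_insert_self, PySem.Dict.insert_insert_self,
      PySem.Dict.getD_of_not_contains d [] hc]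

lemma foldA_eq (devices : List (List (String × String))) :
    devices.foldl
      (fun room_devices device =>
        let room_name := roomKey device
        let room_devices :=
          if room_devices.contains room_name then room_devices
          else room_devices.insert room_name []
        room_devices.modify room_name [] (· ++ [device]))
      PySem.Dict.empty
    = devices.foldl (fun d device => d.modify (roomKey device) [] (· ++ [device]))
        PySem.Dict.empty := by
  have hf : (fun (rd : PySem.Dict String (List (List (String × String)))) device =>
        let room_name := roomKey device
        let rd' := if rd.contains room_name then rd else rd.insert room_name []
        rd'.modify room_name [] (· ++ [device]))
      = (fun d device => d.modify (roomKey device) [] (· ++ [device])) := by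
    funext d dev
    exact stepA_eq_modify d (roomKey dev) dev
  rw [hf]

-- the keys of the grouping fold are the ordered dedup of the room keys
lemma keys_fold (devices : List (List (String × String))) :
    (devices.foldl (fun d device => d.modify (roomKey device) [] (· ++ [device]))
        PySem.Dict.empty).keys
      = PySem.List.dedup (devices.map roomKey) := by
  rw [PySem.Dict.keys_foldl_modify_key devices roomKey []
        (fun _ device => (· ++ [device])) PySem.Dict.empty]
  rfl

-- each bucket of the grouping fold is the filter of the device list by that room
lemma getD_fold (devices : List (List (String × String))) (c : String) :
    (devices.foldl (fun d device => d.modify (roomKey device) [] (· ++ [device]))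
        PySem.Dict.empty).getD c []
      = devices.filter (fun d => roomKey d == c) := by
  have h := PySem.Dict.getD_foldl_modify_append
      (devices.map (fun dev => (roomKey dev, dev))) PySem.Dict.empty c
  rw [List.foldl_map] at h
  simpa [List.filter_map, Function.comp_def] using h

-- ===== VERDICT (by name: the statement is the Claim_ definition above) =====
theorem get_devices_by_room_spec : Claim_equal_get_devices_by_room := by
  intro devices _
  show get_devices_by_room devices = get_devices_by_room_alt devices
  rw [get_devices_by_room, foldA_eq, get_devices_by_room_alt]
  have hnd : (devices.foldl (fun d device => d.modify (roomKey device) [] (· ++ [device]))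
      PySem.Dict.empty).keys.Nodup :=
    PySem.Dict.nodup_keys_foldl_modify_key devices roomKey []
      (fun _ device => (· ++ [device])) PySem.Dict.empty (by simp)
  rw [PySem.Dict.items_eq_map_keys _ hnd [], keys_fold]
  exact List.map_congr_left (fun k _ => by rw [getD_fold devices k])
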